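-- pv_equiv track=rewrite | github.com/RomanVithar/LaSP | task1/main.py | task10
-- ===== SOURCE A (Python) =====
-- def task10(list_num):
--     new_list = list()
--     main_first = 0
--     max_count = 0
--     main_b = 0
--     for i in range(len(list_num)):
--         for j in range(i+1, len(list_num)):
--             temp = progression_count(list_num, i, list_num[j]-list_num[i])
--             if temp > max_count:
--                 max_count = temp
--                 main_first = i
--                 main_b = list_num[j]-list_num[i]
--     return printer_t10(list_num, main_first, main_b)
--
-- def printer_t10(list_num, firstIndex, b):
--     new_list = list()
--     current = list_num[firstIndex]
--     for i in range(firstIndex, len(list_num)):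
--         if(list_num[i] == current):
--             new_list.append(list_num[i])
--             current += b
--     return new_list
--
-- def progression_count(list_num, firstIndex, b):
--     current = list_num[firstIndex]
--     count = 0
--     for i in range(firstIndex, len(list_num)):
--         if(list_num[i] == current):
--             count += 1
--             current += b
--     return count
-- ===== SOURCE B (Python) =====
-- def task10(list_num):
--     # Right-to-left DP: chain-count dicts per position replace the O(n) greedy
--     # rescans, giving O(n^2) total instead of A's O(n^3).
--     n = len(list_num)
--     if n == 0:
--         return []
--     dps = []  # dps[off] = {b: greedy chain count starting at index i+1+off with step b}
--     best_count, best_i, best_b = 0, 0, 0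
--     for i in range(n - 1, -1, -1):
--         vi = list_num[i]
--         d = {}
--         loc_count, loc_b = 0, 0
--         for vj, dj in zip(list_num[i + 1:], dps):
--             b = vj - vi
--             if b not in d:
--                 c = 1 + dj.get(b, 1)
--                 d[b] = c
--                 if c > loc_count:
--                     loc_count, loc_b = c, b
--         if loc_count >= best_count:
--             best_count, best_i, best_b = loc_count, i, loc_b
--         dps.insert(0, d)
--     out = []
--     cur = list_num[best_i]
--     for x in list_num[best_i:]:
--         if x == cur:
--             out.append(x)
--             cur += best_b
--     return out
-- ===== Notes on version B (the rewrite author's own statement) =====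
-- stated objective: faster
-- what changed: Replaces A's O(n) greedy rescan for every (i,j) pair by a right-to-left DP that keeps, per position, a dict from step b to the greedy chain count starting there (each pair then costs O(1)), with A's tie-breaking reproduced by a >=-merge over descending start indices.
import Mathlib
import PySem

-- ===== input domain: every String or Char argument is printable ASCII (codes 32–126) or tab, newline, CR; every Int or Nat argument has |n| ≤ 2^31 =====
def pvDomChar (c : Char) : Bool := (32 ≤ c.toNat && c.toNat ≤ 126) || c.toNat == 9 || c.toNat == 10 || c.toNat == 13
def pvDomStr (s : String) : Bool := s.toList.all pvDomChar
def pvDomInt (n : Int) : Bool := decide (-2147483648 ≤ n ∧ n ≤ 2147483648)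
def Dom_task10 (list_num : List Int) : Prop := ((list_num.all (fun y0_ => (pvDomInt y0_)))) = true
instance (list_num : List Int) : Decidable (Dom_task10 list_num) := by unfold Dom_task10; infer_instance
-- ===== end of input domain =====

-- B replaces A's per-pair greedy rescan by a right-to-left DP over chain-count dicts: O(n^2) instead of O(n^3).

-- ===== PORT A =====
def progressionCount (list_num : List Int) (firstIndex : Int) (b : Int) : Int :=
  ((PySem.List.pyRange firstIndex (list_num.length : Int) 1).foldl
    (fun (s : Int × Int) i =>
      if PySem.List.pyGetD list_num i 0 == s.1 then (s.1 + b, s.2 + 1) else s)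
    (PySem.List.pyGetD list_num firstIndex 0, 0)).2

def printerT10 (list_num : List Int) (firstIndex : Int) (b : Int) : List Int :=
  ((PySem.List.pyRange firstIndex (list_num.length : Int) 1).foldl
    (fun (s : List Int × Int) i =>
      if PySem.List.pyGetD list_num i 0 == s.2 then
        (s.1 ++ [PySem.List.pyGetD list_num i 0], s.2 + b) else s)
    ([], PySem.List.pyGetD list_num firstIndex 0)).1

def task10 (list_num : List Int) : List Int :=
  let n : Int := list_num.length
  let st := (PySem.List.pyRange 0 n 1).foldl
    (fun (s : Int × Int × Int) i =>
      (PySem.List.pyRange (i + 1) n 1).foldl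
        (fun (t : Int × Int × Int) j =>
          let temp := progressionCount list_num i
            (PySem.List.pyGetD list_num j 0 - PySem.List.pyGetD list_num i 0)
          if t.2.1 < temp then
            (i, temp, PySem.List.pyGetD list_num j 0 - PySem.List.pyGetD list_num i 0)
          else t) s)
    (0, 0, 0)
  printerT10 list_num st.1 st.2.2

-- ===== PORT B =====
def task10_alt (list_num : List Int) : List Int :=
  let n : Int := list_num.length
  if n == 0 then []
  else
    -- outer loop: for i in reversed(range(n)); state (dps, best_count, best_i, best_b)
    let st := ((PySem.List.pyRange 0 n 1).reverse).foldl
      (fun (s : List (PySem.Dict Int Int) × Int × Int × Int) i =>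
        let vi := PySem.List.pyGetD list_num i 0
        -- inner loop: for vj, dj in zip(list_num[i+1:], dps); state (d, loc_count, loc_b)
        let t := (List.zip (PySem.List.slice list_num (some (i + 1)) none) s.1).foldl
          (fun (u : PySem.Dict Int Int × Int × Int) p =>
            let b := p.1 - vi
            if u.1.contains b then u
            else
              let c := 1 + p.2.getD b 1
              (u.1.insert b c, if u.2.1 < c then (c, b) else u.2))
          (PySem.Dict.empty, 0, 0)
        if s.2.1 ≤ t.2.1 then (t.1 :: s.1, t.2.1, i, t.2.2)
        else (t.1 :: s.1, s.2.1, s.2.2.1, s.2.2.2))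
      ([], 0, 0, 0)
    -- final walk: cur = list_num[best_i]; for x in list_num[best_i:]: ...
    ((PySem.List.slice list_num (some st.2.2.1) none).foldl
      (fun (u : List Int × Int) x =>
        if x == u.2 then (u.1 ++ [x], u.2 + st.2.2.2) else u)
      ([], PySem.List.pyGetD list_num st.2.2.1 0)).1

-- ===== PRECONDITION & SPEC =====
-- Pre_ excludes only the empty list, on which A raises IndexError.
def Pre_task10 (list_num : List Int) : Prop := list_num ≠ []
instance (list_num : List Int) : Decidable (Pre_task10 list_num) := by unfold Pre_task10; infer_instance
def pvWitness_task10 : List Int := ([3, 1, 2, 3, 4])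

def Spec_task10 (list_num : List Int) (out : List Int) : Prop := out = task10_alt list_num
instance (list_num : List Int) (out : List Int) : Decidable (Spec_task10 list_num out) := by unfold Spec_task10; infer_instance

-- ===== CLAIM (what is proved, stated in full; the proofs are below) =====
def Claim_equal_task10 : Prop := ∀ (list_num : List Int), Dom_task10 list_num → Pre_task10 list_num → Spec_task10 list_num (task10 list_num)
-- ===== LEMMAS AND PROOFS =====

-- greedy chain count / collected list over a suffix, with running target value
def cfv (b : Int) : List Int → Int → Int
  | [], _ => 0
  | x :: t, v => if x = v then 1 + cfv b t (v + b) else cfv b t v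

def clv (b : Int) : List Int → Int → List Int
  | [], _ => []
  | x :: t, v => if x = v then x :: clv b t (v + b) else clv b t v

lemma cfv_nonneg (b : Int) : ∀ (t : List Int) (v : Int), 0 ≤ cfv b t v := by
  intro t
  induction t with
  | nil => intro v; simp [cfv]
  | cons x t ih => intro v; simp only [cfv]; split <;> [linarith [ih (v + b)]; exact ih v]

lemma cfv_eq_zero_iff (b : Int) : ∀ (t : List Int) (v : Int), cfv b t v = 0 ↔ v ∉ t := by
  intro t
  induction t with
  | nil => intro v; simp [cfv]
  | cons x t ih =>
    intro v
    simp only [cfv, List.mem_cons]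
    by_cases h : x = v
    · rw [if_pos h]
      constructor
      · intro hz; exfalso; linarith [cfv_nonneg b t (v + b)]
      · intro hn; exact absurd h.symm (by tauto)
    · rw [if_neg h, ih v]
      constructor
      · intro hv; exact fun hc => hc.elim (fun he => h he.symm) hv
      · intro hc; exact fun hm => hc (Or.inr hm)

lemma cfv_append_not_mem (b : Int) : ∀ (u t : List Int) (v : Int), v ∉ u → cfv b (u ++ t) v = cfv b t v := by
  intro u
  induction u with
  | nil => intro t v _; simp
  | cons x u ih =>
    intro t v hv
    simp only [List.mem_cons, not_or] at hv
    simp only [List.cons_append, cfv, if_neg (fun h : x = v => hv.1 h.symm)]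
    exact ih t v hv.2

-- Int range → Nat range'
lemma pyRange_natmap : ∀ (m : Nat) (a b : Int), 0 ≤ a → (b - a).toNat = m →
    PySem.List.pyRange a b 1 = (List.range' a.toNat m).map (fun k : Nat => (k : Int)) := by
  intro m
  induction m with
  | zero =>
    intro a b ha hm
    rw [PySem.List.pyRange_one_eq_nil (by omega), List.range'_zero, List.map_nil]
  | succ m ih =>
    intro a b ha hm
    have hab : a < b := by omega
    rw [PySem.List.pyRange_one_cons hab, List.range'_succ, List.map_cons,
      ih (a + 1) b (by omega) (by omega)]
    have h1 : ((a.toNat : Int)) = a := Int.toNat_of_nonneg ha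
    have h2 : (a + 1).toNat = a.toNat + 1 := by omega
    rw [h2, h1]

-- a fold over indices whose body only reads the value is a fold over the suffix
lemma foldl_range'_getD {σ : Type} (xs : List Int) (f : σ → Int → σ) :
    ∀ (m i : Nat), i + m = xs.length → ∀ (init : σ),
    (List.range' i m).foldl (fun s k => f s (xs.getD k 0)) init = (xs.drop i).foldl f init := by
  intro m
  induction m with
  | zero =>
    intro i hlen init
    rw [List.range'_zero, List.foldl_nil, List.drop_eq_nil_of_le (by omega), List.foldl_nil]
  | succ m ih =>
    intro i hlen init
    have hi : i < xs.length := by omega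
    rw [List.range'_succ, List.foldl_cons, List.drop_eq_getElem_cons hi, List.foldl_cons,
      List.getD_eq_getElem xs 0 hi, ih (i + 1) (by omega)]

lemma cfv_fold (b : Int) : ∀ (t : List Int) (v c : Int),
    (t.foldl (fun (s : Int × Int) x => if x == s.1 then (s.1 + b, s.2 + 1) else s) (v, c)).2
      = c + cfv b t v := by
  intro t
  induction t with
  | nil => intro v c; simp [cfv]
  | cons x t ih =>
    intro v c
    rw [List.foldl_cons]
    by_cases h : x = v
    · rw [if_pos (by simpa using h)]
      simp only [cfv, if_pos h]
      rw [ih]; ring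
    · rw [if_neg (by simpa using h)]
      simp only [cfv, if_neg h]
      rw [ih]

lemma clv_fold (b : Int) : ∀ (t : List Int) (v : Int) (acc : List Int),
    (t.foldl (fun (s : List Int × Int) x => if x == s.2 then (s.1 ++ [x], s.2 + b) else s) (acc, v)).1
      = acc ++ clv b t v := by
  intro t
  induction t with
  | nil => intro v acc; simp [clv]
  | cons x t ih =>
    intro v acc
    rw [List.foldl_cons]
    by_cases h : x = v
    · rw [if_pos (by simpa using h)]
      simp only [clv, if_pos h]
      rw [ih, List.append_assoc]; rfl
    · rw [if_neg (by simpa using h)]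
      simp only [clv, if_neg h]
      rw [ih]

lemma progCount_eq (xs : List Int) (i : Nat) (hi : i < xs.length) (b : Int) :
    progressionCount xs (i : Int) b = cfv b (xs.drop i) (xs.getD i 0) := by
  unfold progressionCount
  rw [pyRange_natmap (xs.length - i) (i : Int) (xs.length : Int) (Int.natCast_nonneg i) (by omega)]
  rw [List.foldl_map]
  simp only [PySem.List.pyGetD_natCast, Int.toNat_natCast]
  rw [foldl_range'_getD xs (fun (s : Int × Int) x => if x == s.1 then (s.1 + b, s.2 + 1) else s)
    (xs.length - i) i (by omega)]
  rw [cfv_fold, zero_add, List.getD_eq_getElem xs 0 hi]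

lemma printer_eq (xs : List Int) (i : Nat) (hi : i ≤ xs.length) (b : Int) :
    printerT10 xs (i : Int) b = clv b (xs.drop i) (PySem.List.pyGetD xs (i : Int) 0) := by
  unfold printerT10
  rw [pyRange_natmap (xs.length - i) (i : Int) (xs.length : Int) (Int.natCast_nonneg i) (by omega)]
  rw [List.foldl_map]
  simp only [PySem.List.pyGetD_natCast, Int.toNat_natCast]
  rw [foldl_range'_getD xs
    (fun (s : List Int × Int) x => if x == s.2 then (s.1 ++ [x], s.2 + b) else s)
    (xs.length - i) i (by omega)]
  rw [clv_fold, List.nil_append]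

-- running strict max over (count, b) pairs
def mfold (l : List (Int × Int)) (p : Int × Int) : Int × Int :=
  l.foldl (fun u q => if u.1 < q.1 then q else u) p

lemma mfold_fst_le : ∀ (l : List (Int × Int)) (p : Int × Int), p.1 ≤ (mfold l p).1 := by
  intro l
  induction l with
  | nil => intro p; simp [mfold]
  | cons q l ih =>
    intro p
    simp only [mfold, List.foldl_cons]
    split
    · rename_i h; exact le_trans (le_of_lt h) (ih q)
    · exact ih p

lemma mfold_ge_mem : ∀ (l : List (Int × Int)) (p q : Int × Int), q ∈ l → q.1 ≤ (mfold l p).1 := by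
  intro l
  induction l with
  | nil => intro p q h; simp at h
  | cons r l ih =>
    intro p q h
    rcases List.mem_cons.mp h with h | h
    · subst h
      simp only [mfold, List.foldl_cons]
      split
      · exact mfold_fst_le l q
      · rename_i hn; exact le_trans (not_lt.mp hn) (mfold_fst_le l p)
    · simp only [mfold, List.foldl_cons]
      split <;> exact ih _ q h

lemma mfold_append_singleton (l : List (Int × Int)) (p q : Int × Int) :
    mfold (l ++ [q]) p = if (mfold l p).1 < q.1 then q else mfold l p := by
  simp only [mfold, List.foldl_append, List.foldl_cons, List.foldl_nil]

lemma mfold_raise : ∀ (l : List (Int × Int)) (p q : Int × Int), p.1 ≤ q.1 →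
    mfold l q = if q.1 < (mfold l p).1 then mfold l p else q := by
  intro l
  induction l with
  | nil =>
    intro p q h
    simp only [mfold, List.foldl_nil]
    rw [if_neg (by omega)]
  | cons r l ih =>
    intro p q h
    simp only [mfold, List.foldl_cons]
    by_cases hq : q.1 < r.1
    · rw [if_pos hq, show (if p.1 < r.1 then r else p) = r from if_pos (by omega)]
      have hle := mfold_fst_le l r
      simp only [mfold] at hle
      rw [if_pos (lt_of_lt_of_le hq hle)]
    · rw [if_neg hq]
      by_cases hp : p.1 < r.1
      · rw [if_pos hp]; exact ih r q (by omega)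
      · rw [if_neg hp]; exact ih p q h

lemma innerA_char (I : Int) : ∀ (ents : List (Int × Int)) (mf mc mb : Int),
    ents.foldl (fun (t : Int × Int × Int) q => if t.2.1 < q.1 then (I, q.1, q.2) else t) (mf, mc, mb)
      = ((if mc < (mfold ents (mc, mb)).1 then I else mf),
          (mfold ents (mc, mb)).1, (mfold ents (mc, mb)).2) := by
  intro ents
  induction ents with
  | nil =>
    intro mf mc mb
    simp only [List.foldl_nil, mfold, lt_self_iff_false, if_false]
  | cons q ts ih =>
    intro mf mc mb
    rw [List.foldl_cons]
    by_cases h : mc < q.1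
    · rw [if_pos h, ih]
      have h1 : mfold (q :: ts) (mc, mb) = mfold ts q := by
        simp only [mfold, List.foldl_cons]; rw [if_pos h]
      have h2 : mfold ts (q.1, q.2) = mfold ts q := rfl
      have hle := mfold_fst_le ts q
      rw [h1, h2, if_pos (lt_of_lt_of_le h hle), ite_self]
    · rw [if_neg h]
      have h1 : mfold (q :: ts) (mc, mb) = mfold ts (mc, mb) := by
        simp only [mfold, List.foldl_cons]; rw [if_neg h]
      rw [h1, ih]

-- ascending strict-> argmax (A) versus descending >=-merge (B)
def descB (L : List (Int × Int × Int)) : Int × Int × Int :=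
  L.foldr (fun e s => if s.1 ≤ e.2.1 then (e.2.1, e.1, e.2.2) else s) (0, 0, 0)

lemma descB_ge_mem : ∀ (L : List (Int × Int × Int)) (e : Int × Int × Int), e ∈ L → e.2.1 ≤ (descB L).1 := by
  intro L
  induction L with
  | nil => intro e h; simp at h
  | cons r L ih =>
    intro e h
    simp only [descB, List.foldr_cons]
    rcases List.mem_cons.mp h with h | h
    · subst h
      split
      · rfl
      · rename_i hn
        have := ih
        simp only [descB] at this
        omega
    · have hle := ih e h
      simp only [descB] at hle
      split
      · rename_i hc; omega
      · exact hle

lemma descB_cases : ∀ (L : List (Int × Int × Int)),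
    descB L = (0, 0, 0) ∨ ∃ e ∈ L, descB L = (e.2.1, e.1, e.2.2) := by
  intro L
  induction L with
  | nil => left; rfl
  | cons r L ih =>
    simp only [descB, List.foldr_cons]
    split
    · right; exact ⟨r, List.mem_cons_self, rfl⟩
    · rcases ih with h | ⟨e, he, h⟩
      · left; simpa [descB] using h
      · right
        refine ⟨e, List.mem_cons_of_mem r he, ?_⟩
        simpa [descB] using h

lemma asc_desc : ∀ (L : List (Int × Int × Int)), (∀ e ∈ L, 0 ≤ e.2.1) →
    ∀ (s : Int × Int × Int), 0 ≤ s.2.1 →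
    L.foldl (fun s e => if s.2.1 < e.2.1 then e else s) s
      = if s.2.1 < (descB L).1 then ((descB L).2.1, (descB L).1, (descB L).2.2) else s := by
  intro L
  induction L with
  | nil =>
    intro _ s hs
    simp only [List.foldl_nil, descB, List.foldr_nil]
    rw [if_neg (by omega)]
  | cons e L ih =>
    intro h s hs
    have he : 0 ≤ e.2.1 := h e List.mem_cons_self
    have hL : ∀ e' ∈ L, 0 ≤ e'.2.1 := fun e' he' => h e' (List.mem_cons_of_mem e he')
    have hdL : descB (e :: L) = if (descB L).1 ≤ e.2.1 then (e.2.1, e.1, e.2.2) else descB L := by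
      simp only [descB, List.foldr_cons]
    rw [List.foldl_cons, hdL]
    by_cases hc : (descB L).1 ≤ e.2.1
    · rw [if_pos hc]
      by_cases hs1 : s.2.1 < e.2.1
      · rw [if_pos hs1, ih hL e he, if_neg (by omega)]
      · rw [if_neg hs1, ih hL s hs, if_neg (by omega)]
    · rw [if_neg hc]
      by_cases hs1 : s.2.1 < e.2.1
      · rw [if_pos hs1, ih hL e he, if_pos (by omega), if_pos (by omega)]
      · rw [if_neg hs1, ih hL s hs]

-- DP bookkeeping: one dict gives every chain count starting just before suffix t at value v
def DictSpec (v : Int) (t : List Int) (d : PySem.Dict Int Int) : Prop :=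
  ∀ b : Int, d.getD b 1 = 1 + cfv b t (v + b)

def DPS : List Int → List (PySem.Dict Int Int) → Prop
  | [], ds => ds = []
  | v :: t, ds => ∃ d ds', ds = d :: ds' ∧ DictSpec v t d ∧ DPS t ds'

def entf (vi : Int) (rest : List Int) (vj : Int) : Int × Int :=
  (1 + cfv (vj - vi) rest vj, vj - vi)

-- B's inner loop as a function of the zipped suffix
def innerFoldB (vi : Int) (w : List Int) (dw : List (PySem.Dict Int Int))
    (st : PySem.Dict Int Int × Int × Int) : PySem.Dict Int Int × Int × Int :=
  (List.zip w dw).foldl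
    (fun (s : PySem.Dict Int Int × Int × Int) p =>
      if s.1.contains (p.1 - vi) then s
      else (s.1.insert (p.1 - vi) (1 + p.2.getD (p.1 - vi) 1),
            if s.2.1 < 1 + p.2.getD (p.1 - vi) 1 then (1 + p.2.getD (p.1 - vi) 1, p.1 - vi)
            else s.2)) st

-- B's inner loop builds the chain dict for vi and the local strict max over all pairs
lemma innerB_zip (vi : Int) : ∀ (w u : List Int) (dw : List (PySem.Dict Int Int))
    (d : PySem.Dict Int Int) (lc lb : Int),
    DPS w dw →
    (∀ b : Int, d.contains b = true ↔ (vi + b) ∈ u) →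
    (∀ b : Int, d.contains b = true → d.getD b 1 = 1 + cfv b (u ++ w) (vi + b)) →
    ((lc, lb) = mfold (u.map (entf vi (u ++ w))) (0, 0)) →
    (innerFoldB vi w dw (d, lc, lb)).2 = mfold ((u ++ w).map (entf vi (u ++ w))) (0, 0)
      ∧ DictSpec vi (u ++ w) (innerFoldB vi w dw (d, lc, lb)).1 := by
  intro w
  induction w with
  | nil =>
    intro u dw d lc lb hdps hkeys hval hloc
    have hdw : dw = [] := hdps
    subst hdw
    simp only [List.append_nil] at hloc hval ⊢
    simp only [innerFoldB, List.zip_nil_right, List.foldl_nil]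
    refine ⟨hloc.symm ▸ rfl, ?_⟩
    intro b
    by_cases hb : d.contains b = true
    · exact hval b hb
    · rw [PySem.Dict.getD_of_not_contains (h := by simpa using hb)]
      have hnm : vi + b ∉ u := fun hm => hb ((hkeys b).mpr hm)
      rw [(cfv_eq_zero_iff b u (vi + b)).mpr hnm]
      omega
  | cons vj w' ih =>
    intro u dw d lc lb hdps hkeys hval hloc
    obtain ⟨dj, dw', rfl, hdj, hdps'⟩ := hdps
    have hvb : vi + (vj - vi) = vj := by ring
    have hre : u ++ vj :: w' = (u ++ [vj]) ++ w' := by simp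
    have hstep : innerFoldB vi (vj :: w') (dj :: dw') (d, lc, lb)
        = innerFoldB vi w' dw'
            (if d.contains (vj - vi) then (d, lc, lb)
             else (d.insert (vj - vi) (1 + dj.getD (vj - vi) 1),
                   if lc < 1 + dj.getD (vj - vi) 1 then (1 + dj.getD (vj - vi) 1, vj - vi)
                   else (lc, lb))) := by
      simp only [innerFoldB, List.zip_cons_cons, List.foldl_cons]
    by_cases hct : d.contains (vj - vi) = true
    · -- duplicate step b: state unchanged
      rw [hstep, if_pos hct, hre]
      apply ih (u ++ [vj]) dw' d lc lb hdps'
      · intro b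
        rw [hkeys b]
        simp only [List.mem_append, List.mem_singleton]
        constructor
        · exact fun hm => Or.inl hm
        · intro hm
          rcases hm with hm | hm
          · exact hm
          · have hb : b = vj - vi := by omega
            subst hb
            rw [hvb]
            have := (hkeys (vj - vi)).mp hct
            rwa [hvb] at this
      · intro b hb
        rw [← hre]
        exact hval b hb
      · rw [List.map_append, List.map_cons, List.map_nil, mfold_append_singleton, ← hre]
        have hmu : vj ∈ u := by
          have := (hkeys (vj - vi)).mp hct
          rwa [hvb] at this
        have hm : entf vi (u ++ vj :: w') vj ∈ u.map (entf vi (u ++ vj :: w')) :=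
          List.mem_map_of_mem hmu
        have hge := mfold_ge_mem (u.map (entf vi (u ++ vj :: w'))) (0, 0) _ hm
        rw [if_neg (by omega), ← hloc]
    · -- fresh step b: insert chain count 1 + dj[b]
      have hctf : d.contains (vj - vi) = false := by simpa using hct
      have hnm : vj ∉ u := by
        intro hm
        apply hct
        apply (hkeys (vj - vi)).mpr
        rw [hvb]
        exact hm
      have hc : 1 + dj.getD (vj - vi) 1 = (entf vi (u ++ vj :: w') vj).1 := by
        simp only [entf]
        rw [hdj (vj - vi), cfv_append_not_mem _ u (vj :: w') vj hnm]
        simp [cfv]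
      rw [hstep, if_neg (by simp [hctf]), hre]
      apply ih (u ++ [vj]) dw' _ _ _ hdps'
      · intro b
        rw [PySem.Dict.contains_insert]
        simp only [List.mem_append, List.mem_singleton, Bool.or_eq_true, beq_iff_eq]
        constructor
        · rintro (hb | hb)
          · subst hb; right; exact hvb
          · exact Or.inl ((hkeys b).mp hb)
        · rintro (hm | hm)
          · exact Or.inr ((hkeys b).mpr hm)
          · left; omega
      · intro b hb
        rw [PySem.Dict.getD_insert]
        by_cases hbb : b = vj - vi
        · rw [if_pos hbb, ← hre, hbb, hc]
          simp only [entf]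
          rw [hvb]
        · rw [if_neg hbb, ← hre]
          apply hval b
          rw [PySem.Dict.contains_insert] at hb
          simpa [hbb] using hb
      · rw [← hre, List.map_append, List.map_cons, List.map_nil, mfold_append_singleton, ← hloc]
        rw [Prod.mk.eta]
        show (if lc < 1 + dj.getD (vj - vi) 1 then (1 + dj.getD (vj - vi) 1, vj - vi)
          else (lc, lb)) = _
        have hsw : (if lc < 1 + dj.getD (vj - vi) 1 then (1 + dj.getD (vj - vi) 1, vj - vi)
              else (lc, lb))
            = if lc < (entf vi (u ++ vj :: w') vj).1 then ((entf vi (u ++ vj :: w') vj).1, vj - vi)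
              else (lc, lb) := by rw [hc]
        rw [hsw]
        by_cases hlt : lc < (entf vi (u ++ vj :: w') vj).1
        · rw [if_pos hlt, if_pos hlt]
          simp [entf]
        · rw [if_neg hlt, if_neg hlt]

-- per-start-index local data: entries, local argmax, packaged (i, count, b) entry
def locI (xs : List Int) (i : Nat) : Int × Int :=
  mfold ((xs.drop (i + 1)).map (entf (xs.getD i 0) (xs.drop (i + 1)))) (0, 0)

def entryI (xs : List Int) (i : Nat) : Int × Int × Int :=
  ((i : Int), (locI xs i).1, (locI xs i).2)

lemma locI_nonneg (xs : List Int) (i : Nat) : 0 ≤ (locI xs i).1 :=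
  mfold_fst_le _ (0, 0)

lemma locI_pos (xs : List Int) (i : Nat) (h : xs.drop (i + 1) ≠ []) : 1 ≤ (locI xs i).1 := by
  obtain ⟨x, t, hxt⟩ := List.exists_cons_of_ne_nil h
  have hm : entf (xs.getD i 0) (xs.drop (i + 1)) x
      ∈ (xs.drop (i + 1)).map (entf (xs.getD i 0) (xs.drop (i + 1))) :=
    List.mem_map_of_mem (by rw [hxt]; exact List.mem_cons_self)
  have hge := mfold_ge_mem _ (0, 0) _ hm
  have h1 : 1 ≤ (entf (xs.getD i 0) (xs.drop (i + 1)) x).1 := by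
    simp only [entf]
    linarith [cfv_nonneg (x - xs.getD i 0) (xs.drop (i + 1)) x]
  exact le_trans h1 hge

lemma progCount_entf (xs : List Int) (i : Nat) (hi : i < xs.length) (vj : Int) :
    progressionCount xs (i : Int) (vj - xs.getD i 0)
      = (entf (xs.getD i 0) (xs.drop (i + 1)) vj).1 := by
  rw [progCount_eq xs i hi]
  have hd : xs.drop i = xs.getD i 0 :: xs.drop (i + 1) := by
    rw [List.drop_eq_getElem_cons hi, List.getD_eq_getElem xs 0 hi]
  rw [hd]
  simp [cfv, entf]

-- A's inner loop, from Int range to a strict-max merge with the local argmax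
lemma stepA (xs : List Int) (i : Nat) (hi : i < xs.length) (s : Int × Int × Int) (hs : 0 ≤ s.2.1) :
    (PySem.List.pyRange ((i : Int) + 1) (xs.length : Int) 1).foldl
      (fun (t : Int × Int × Int) j =>
        let temp := progressionCount xs (i : Int)
          (PySem.List.pyGetD xs j 0 - PySem.List.pyGetD xs (i : Int) 0)
        if t.2.1 < temp then
          ((i : Int), temp, PySem.List.pyGetD xs j 0 - PySem.List.pyGetD xs (i : Int) 0)
        else t) s
      = if s.2.1 < (locI xs i).1 then entryI xs i else s := by
  have hcast : ((i : Int) + 1) = ((i + 1 : Nat) : Int) := by push_cast; ring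
  rw [hcast, pyRange_natmap (xs.length - (i + 1)) _ _ (Int.natCast_nonneg _) (by omega),
    List.foldl_map]
  simp only [PySem.List.pyGetD_natCast, Int.toNat_natCast]
  rw [foldl_range'_getD xs
    (fun (t : Int × Int × Int) vj =>
      let temp := progressionCount xs (i : Int) (vj - xs.getD i 0)
      if t.2.1 < temp then ((i : Int), temp, vj - xs.getD i 0) else t)
    (xs.length - (i + 1)) (i + 1) (by omega)]
  have hcong := PySem.List.foldl_congr_mem (l := xs.drop (i + 1)) (init := s)
    (f := fun (t : Int × Int × Int) vj =>
      let temp := progressionCount xs (i : Int) (vj - xs.getD i 0)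
      if t.2.1 < temp then ((i : Int), temp, vj - xs.getD i 0) else t)
    (g := fun (t : Int × Int × Int) vj =>
      if t.2.1 < (entf (xs.getD i 0) (xs.drop (i + 1)) vj).1 then
        ((i : Int), (entf (xs.getD i 0) (xs.drop (i + 1)) vj).1,
         (entf (xs.getD i 0) (xs.drop (i + 1)) vj).2)
      else t)
    (by
      intro acc vj _
      simp only [progCount_entf xs i hi vj, entf])
  rw [hcong]
  rw [← List.foldl_map (f := entf (xs.getD i 0) (xs.drop (i + 1)))
    (g := fun (t : Int × Int × Int) q => if t.2.1 < q.1 then ((i : Int), q.1, q.2) else t)]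
  rw [innerA_char (i : Int) _ s.1 s.2.1 s.2.2]
  have hraise := mfold_raise ((xs.drop (i + 1)).map (entf (xs.getD i 0) (xs.drop (i + 1))))
    (0, 0) (s.2.1, s.2.2) (by simpa using hs)
  rw [hraise]
  have hloc0 : mfold ((xs.drop (i + 1)).map (entf (xs.getD i 0) (xs.drop (i + 1)))) (0, 0)
      = locI xs i := rfl
  rw [hloc0]
  by_cases hlt : s.2.1 < (locI xs i).1
  · rw [if_pos hlt, if_pos hlt, if_pos hlt]
    rfl
  · rw [if_neg hlt, if_neg hlt, if_neg (lt_irrefl s.2.1)]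

lemma outerA (xs : List Int) : ∀ (is : List Nat), (∀ i ∈ is, i < xs.length) →
    ∀ (s : Int × Int × Int), 0 ≤ s.2.1 →
    is.foldl (fun (s : Int × Int × Int) (k : Nat) =>
      (PySem.List.pyRange ((k : Int) + 1) (xs.length : Int) 1).foldl
        (fun (t : Int × Int × Int) j =>
          let temp := progressionCount xs (k : Int)
            (PySem.List.pyGetD xs j 0 - PySem.List.pyGetD xs (k : Int) 0)
          if t.2.1 < temp then
            ((k : Int), temp, PySem.List.pyGetD xs j 0 - PySem.List.pyGetD xs (k : Int) 0)
          else t) s) s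
      = (is.map (entryI xs)).foldl (fun s e => if s.2.1 < e.2.1 then e else s) s := by
  intro is
  induction is with
  | nil => intro _ s _; rfl
  | cons k is ih =>
    intro h s hs
    rw [List.foldl_cons, List.map_cons, List.foldl_cons,
      stepA xs k (h k List.mem_cons_self) s hs]
    have he : (entryI xs k).2.1 = (locI xs k).1 := rfl
    rw [← he]
    by_cases hlt : s.2.1 < (entryI xs k).2.1
    · rw [if_pos hlt]
      exact ih (fun i hi => h i (List.mem_cons_of_mem k hi)) _ (locI_nonneg xs k)
    · rw [if_neg hlt]
      exact ih (fun i hi => h i (List.mem_cons_of_mem k hi)) s hs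

lemma task10_eq (xs : List Int) :
    task10 xs
      = printerT10 xs
          (((List.range' 0 xs.length).map (entryI xs)).foldl
            (fun s e => if s.2.1 < e.2.1 then e else s) (0, 0, 0)).1
          (((List.range' 0 xs.length).map (entryI xs)).foldl
            (fun s e => if s.2.1 < e.2.1 then e else s) (0, 0, 0)).2.2 := by
  simp only [task10]
  rw [pyRange_natmap xs.length 0 (xs.length : Int) le_rfl (by omega), List.foldl_map]
  rw [show ((0 : Int)).toNat = 0 from rfl]
  rw [outerA xs (List.range' 0 xs.length)
    (fun i hi => by have := List.mem_range'_1.mp hi; omega) (0, 0, 0) le_rfl]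
lemma walk_eq (xs : List Int) (i : Nat) (b : Int) :
    ((PySem.List.slice xs (some (i : Int)) none).foldl
      (fun (u : List Int × Int) x => if x == u.2 then (u.1 ++ [x], u.2 + b) else u)
      ([], PySem.List.pyGetD xs (i : Int) 0)).1
      = clv b (xs.drop i) (PySem.List.pyGetD xs (i : Int) 0) := by
  rw [PySem.List.slice_from_natCast, clv_fold, List.nil_append]

lemma outerB (xs : List Int) : ∀ (k : Nat), k ≤ xs.length →
    ∀ (dps : List (PySem.Dict Int Int)) (bc bi bb : Int),
    DPS (xs.drop k) dps →
    ((bc, bi, bb) : Int × Int × Int)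
      = descB ((List.range' k (xs.length - k)).map (entryI xs)) →
    (((List.range' 0 k).reverse).foldl
      (fun (s : List (PySem.Dict Int Int) × Int × Int × Int) (kk : Nat) =>
        let vi := PySem.List.pyGetD xs (kk : Int) 0
        let t := (List.zip (PySem.List.slice xs (some ((kk : Int) + 1)) none) s.1).foldl
          (fun (u : PySem.Dict Int Int × Int × Int) p =>
            let b := p.1 - vi
            if u.1.contains b then u
            else
              let c := 1 + p.2.getD b 1
              (u.1.insert b c, if u.2.1 < c then (c, b) else u.2))
          (PySem.Dict.empty, 0, 0)
        if s.2.1 ≤ t.2.1 then (t.1 :: s.1, t.2.1, (kk : Int), t.2.2)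
        else (t.1 :: s.1, s.2.1, s.2.2.1, s.2.2.2)) (dps, bc, bi, bb)).2
      = descB ((List.range' 0 xs.length).map (entryI xs)) := by
  intro k
  induction k with
  | zero =>
    intro _ dps bc bi bb _ hbest
    rw [List.range'_zero, List.reverse_nil, List.foldl_nil]
    simpa using hbest
  | succ k ih =>
    intro hk dps bc bi bb hdps hbest
    have hrev : (List.range' 0 (k + 1)).reverse = k :: (List.range' 0 k).reverse := by
      rw [List.range'_1_concat, List.reverse_append, List.reverse_singleton, Nat.zero_add]
      rfl
    rw [hrev, List.foldl_cons]
    have hkn : k < xs.length := by omega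
    have hcast : ((k : Int) + 1) = ((k + 1 : Nat) : Int) := by push_cast; ring
    -- the inner fold is innerFoldB on the dropped suffix
    have hif : (List.zip (PySem.List.slice xs (some ((k : Int) + 1)) none) dps).foldl
        (fun (u : PySem.Dict Int Int × Int × Int) p =>
          if u.1.contains (p.1 - PySem.List.pyGetD xs (k : Int) 0) then u
          else (u.1.insert (p.1 - PySem.List.pyGetD xs (k : Int) 0)
                  (1 + p.2.getD (p.1 - PySem.List.pyGetD xs (k : Int) 0) 1),
                if u.2.1 < 1 + p.2.getD (p.1 - PySem.List.pyGetD xs (k : Int) 0) 1 then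
                  (1 + p.2.getD (p.1 - PySem.List.pyGetD xs (k : Int) 0) 1,
                   p.1 - PySem.List.pyGetD xs (k : Int) 0)
                else u.2))
        (PySem.Dict.empty, 0, 0)
        = innerFoldB (xs.getD k 0) (xs.drop (k + 1)) dps (PySem.Dict.empty, 0, 0) := by
      rw [hcast, PySem.List.slice_from_natCast, PySem.List.pyGetD_natCast]
      rfl
    have hdps1 : DPS (xs.drop (k + 1)) dps := hdps
    obtain ⟨hloc', hdict⟩ := innerB_zip (xs.getD k 0) (xs.drop (k + 1)) [] dps
      PySem.Dict.empty 0 0 hdps1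
      (by intro b; simp [PySem.Dict.contains_empty])
      (by intro b hb; rw [PySem.Dict.contains_empty] at hb; cases hb)
      rfl
    simp only [List.nil_append] at hloc' hdict
    have hlocI : (innerFoldB (xs.getD k 0) (xs.drop (k + 1)) dps (PySem.Dict.empty, 0, 0)).2
        = locI xs k := hloc'
    -- the dict stack extends correctly
    have hdps' : DPS (xs.drop k)
        ((innerFoldB (xs.getD k 0) (xs.drop (k + 1)) dps (PySem.Dict.empty, 0, 0)).1 :: dps) := by
      rw [List.drop_eq_getElem_cons hkn]
      refine ⟨_, dps, rfl, ?_, hdps1⟩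
      rw [← List.getD_eq_getElem xs 0 hkn]
      exact hdict
    -- merge step: one more descB entry
    have hdec : List.range' k (xs.length - k) = k :: List.range' (k + 1) (xs.length - (k + 1)) := by
      rw [show xs.length - k = (xs.length - (k + 1)) + 1 from by omega, List.range'_succ]
    have hbest' : descB ((List.range' k (xs.length - k)).map (entryI xs))
        = if (descB ((List.range' (k + 1) (xs.length - (k + 1))).map (entryI xs))).1
              ≤ (locI xs k).1 then
            ((locI xs k).1, (k : Int), (locI xs k).2)
          else descB ((List.range' (k + 1) (xs.length - (k + 1))).map (entryI xs)) := by
      rw [hdec, List.map_cons]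
      simp only [descB, List.foldr_cons, entryI]
    have hbc : bc = (descB ((List.range' (k + 1) (xs.length - (k + 1))).map (entryI xs))).1 :=
      congrArg Prod.fst hbest
    simp only []
    rw [hif, hlocI]
    by_cases hmerge : bc ≤ (locI xs k).1
    · rw [if_pos hmerge]
      apply ih (by omega) _ _ _ _ hdps'
      rw [hbest', if_pos (by omega)]
    · rw [if_neg hmerge]
      apply ih (by omega) _ _ _ _ hdps'
      rw [hbest', if_neg (by omega)]
      exact hbest

lemma task10_alt_eq (xs : List Int) (h : xs ≠ []) :
    task10_alt xs
      = ((PySem.List.slice xs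
            (some ((descB ((List.range' 0 xs.length).map (entryI xs))).2.1)) none).foldl
          (fun (u : List Int × Int) x =>
            if x == u.2 then
              (u.1 ++ [x], u.2 + (descB ((List.range' 0 xs.length).map (entryI xs))).2.2)
            else u)
          ([], PySem.List.pyGetD xs
            ((descB ((List.range' 0 xs.length).map (entryI xs))).2.1) 0)).1 := by
  have hn : xs.length ≠ 0 := by simpa using h
  simp only [task10_alt]
  rw [if_neg (by simp; omega)]
  rw [pyRange_natmap xs.length 0 (xs.length : Int) le_rfl (by omega),
    show ((0 : Int)).toNat = 0 from rfl, ← List.map_reverse, List.foldl_map]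
  have hO := outerB xs xs.length le_rfl [] 0 0 0
    (by rw [List.drop_length]; rfl)
    (by rw [Nat.sub_self, List.range'_zero, List.map_nil]; rfl)
  rw [hO]

theorem task10_spec_aux (xs : List Int) (hpre : xs ≠ []) : task10 xs = task10_alt xs := by
  rw [task10_eq xs, task10_alt_eq xs hpre]
  have hentry : ∀ e ∈ (List.range' 0 xs.length).map (entryI xs), 0 ≤ e.2.1 := by
    intro e he
    obtain ⟨i, _, rfl⟩ := List.mem_map.mp he
    exact locI_nonneg xs i
  rw [asc_desc _ hentry (0, 0, 0) le_rfl]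
  set L := (List.range' 0 xs.length).map (entryI xs) with hL
  have hn1 : 1 ≤ xs.length := by
    have : xs.length ≠ 0 := by simpa using hpre
    omega
  by_cases hD : ((0, 0, 0) : Int × Int × Int).2.1 < (descB L).1
  · rw [if_pos hD]
    rcases descB_cases L with h0 | ⟨e, he, hE⟩
    · rw [h0] at hD; exact absurd hD (by norm_num)
    · obtain ⟨i, hi, rfl⟩ := List.mem_map.mp he
      rw [hE]
      simp only [entryI]
      have hin : i < xs.length := by
        have := List.mem_range'_1.mp hi; omega
      rw [printer_eq xs i (le_of_lt hin), walk_eq xs i]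
  · rw [if_neg hD]
    have hD' : (descB L).1 ≤ 0 := by simpa using hD
    have hD0 : descB L = (0, 0, 0) := by
      rcases descB_cases L with h0 | ⟨e, he, hE⟩
      · exact h0
      · obtain ⟨i, hi, rfl⟩ := List.mem_map.mp he
        have hin : i < xs.length := by
          have := List.mem_range'_1.mp hi; omega
        have hloc0 : (locI xs i).1 ≤ 0 := by
          have hge := descB_ge_mem L _ he
          simp only [entryI] at hge
          omega
        have hdropnil : xs.drop (i + 1) = [] := by
          by_contra hne
          have := locI_pos xs i hne
          omega
        have hi1 : xs.length ≤ i + 1 := by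
          have := List.drop_eq_nil_iff.mp hdropnil
          omega
        have hn2 : xs.length = 1 := by
          by_contra hne
          have hlen2 : 2 ≤ xs.length := by omega
          have h0mem : entryI xs 0 ∈ L := by
            rw [hL]
            exact List.mem_map_of_mem (List.mem_range'_1.mpr (by omega))
          have hd1 : xs.drop (0 + 1) ≠ [] := by
            intro hc
            have := List.drop_eq_nil_iff.mp hc
            omega
          have := locI_pos xs 0 hd1
          have hge0 := descB_ge_mem L _ h0mem
          simp only [entryI] at hge0
          omega
        have hieq : i = 0 := by omega
        subst hieq
        have hdrop : xs.drop (0 + 1) = [] := hdropnil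
        rw [hE]
        simp only [entryI, locI, hdrop, List.map_nil]
        rfl
    rw [hD0]
    have hp := printer_eq xs 0 (by omega) 0
    have hw := walk_eq xs 0 0
    simp only [Nat.cast_zero] at hp hw
    rw [hp, hw]

-- ===== VERDICT (by name: the statement is the Claim_ definition above) =====
theorem task10_spec : Claim_equal_task10 := by
  intro xs _ hpre
  unfold Spec_task10
  exact task10_spec_aux xs hpre
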